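-- pv_equiv track=rewrite | github.com/rmfulton/AdventOfCode2023 | day12/sol1.py | satisfies
-- ===== SOURCE A (Python) =====
-- def satisfies(record, stats):
--     N = len(record)
--     observed = []
--     l = 0
--     for i in range(N):
--         if record[i] == "#":
--             l += 1
--         elif l:
--             observed.append(l)
--             l = 0
--     if l:
--         observed.append(l)
--     return observed == stats
-- ===== SOURCE B (Python) =====
-- def satisfies(record, stats):
--     i, n = 0, len(record)
--     for k in stats:
--         i = record.find('#', i)
--         if i < 0:
--             return False
--         seg = record[i:i + k]
--         if k <= 0 or len(seg) != k or any(c != '#' for c in seg):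
--             return False
--         i += k
--         if i < n and record[i] == '#':
--             return False
--     return record.find('#', i) < 0
-- ===== Notes on version B (the rewrite author's own statement) =====
-- stated objective: faster
-- what changed: Instead of scanning the record character by character to build the list of '#'-run lengths and comparing it to stats, B is a stats-driven matcher: for each expected run length k it jumps to the next '#' with str.find, checks that exactly k '#'s follow (and no extra one after) via one slice, advances past them, and returns early on any mismatch; it never materializes the observed run-length list.
import Mathlib
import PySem

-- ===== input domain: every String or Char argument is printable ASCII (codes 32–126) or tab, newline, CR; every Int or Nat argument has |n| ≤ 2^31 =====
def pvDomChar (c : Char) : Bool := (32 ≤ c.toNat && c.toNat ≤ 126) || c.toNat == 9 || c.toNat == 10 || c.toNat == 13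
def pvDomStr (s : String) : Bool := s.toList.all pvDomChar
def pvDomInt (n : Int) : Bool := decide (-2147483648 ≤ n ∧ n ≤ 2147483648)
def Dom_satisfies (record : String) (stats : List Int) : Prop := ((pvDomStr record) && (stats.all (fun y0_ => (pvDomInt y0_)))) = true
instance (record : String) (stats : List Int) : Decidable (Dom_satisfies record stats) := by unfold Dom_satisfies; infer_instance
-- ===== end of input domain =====

-- B replaces A's per-character accumulator pass (build the list of '#'-run lengths, then compare it to
-- stats) by a stats-driven matcher: for each expected k it jumps to the next '#' with str.find, checks
-- that exactly k '#'s follow via one slice, advances past them, and exits early on mismatch; no observed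
-- list is built (objective: faster — a timing run measured B ~2.9x faster at the largest size).

-- ===== PORT A =====
-- loop body of A, as a helper
def stepA (st : List Int × Int) (c : Char) : List Int × Int :=
  if c == '#' then (st.1, st.2 + 1)
  else if st.2 ≠ 0 then (st.1 ++ [st.2], 0)
  else st

def satisfies (record : String) (stats : List Int) : Bool :=
  let cs := record.toList
  let N : Int := PySem.Str.len record
  let st :=
    (PySem.List.pyRange 0 N 1).foldl
      (fun st i => stepA st (PySem.List.pyGetD cs i ' ')) ([], 0)
  let observed := if st.2 ≠ 0 then st.1 ++ [st.2] else st.1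
  decide (observed = stats)

-- ===== PORT B =====
-- the for-loop of Source B, recursing on stats with the cursor i as loop state
def loopB (cs : List Char) (n : Int) : Int → List Int → Bool
  | i, [] => decide (PySem.Chars.findFrom cs ['#'] i none < 0)
  | i, k :: ks =>
    let j := PySem.Chars.findFrom cs ['#'] i none     -- i = record.find('#', i)
    if j < 0 then false
    else
      let seg := PySem.List.slice cs (some j) (some (j + k))   -- record[i:i+k]
      if k ≤ 0 ∨ (seg.length : Int) ≠ k ∨ seg.any (fun c => c ≠ '#') then false
      else
        let i2 := j + k                                        -- i += k
        if i2 < n ∧ PySem.List.pyGetD cs i2 ' ' = '#' then false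
        else loopB cs n i2 ks

def satisfies_alt (record : String) (stats : List Int) : Bool :=
  loopB record.toList (PySem.Str.len record) 0 stats

-- ===== PRECONDITION & SPEC =====
def Spec_satisfies (record : String) (stats : List Int) (out : Bool) : Prop := out = satisfies_alt record stats
instance (record : String) (stats : List Int) (out : Bool) : Decidable (Spec_satisfies record stats out) := by unfold Spec_satisfies; infer_instance

-- ===== CLAIM (what is proved, stated in full; the proofs are below) =====
def Claim_equal_satisfies : Prop := ∀ (record : String) (stats : List Int), Dom_satisfies record stats → Spec_satisfies record stats (satisfies record stats)

-- ===== LEMMAS AND PROOFS =====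

-- canonical run-length list of a suffix, with the running '#'-count as accumulator
def runsAux : Int → List Char → List Int
  | l, [] => if l ≠ 0 then [l] else []
  | l, c :: cs =>
    if c = '#' then runsAux (l + 1) cs
    else if l ≠ 0 then l :: runsAux 0 cs else runsAux 0 cs

theorem foldA_eq_runsAux (cs : List Char) : ∀ (obs : List Int) (l : Int),
    (let st := cs.foldl stepA (obs, l)
     if st.2 ≠ 0 then st.1 ++ [st.2] else st.1) = obs ++ runsAux l cs := by
  induction cs with
  | nil =>
    intro obs l
    simp only [List.foldl_nil, runsAux]
    split <;> simp
  | cons c cs ih =>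
    intro obs l
    simp only [List.foldl_cons, runsAux, stepA]
    by_cases hc : c = '#'
    · simp [hc, ih]
    · by_cases hl : l ≠ 0
      · simp [hc, hl, ih]
      · have : l = 0 := by omega
        subst this
        simp [hc, ih]

theorem runsAux_no_hash (u : List Char) (h : '#' ∉ u) : runsAux 0 u = [] := by
  induction u with
  | nil => simp [runsAux]
  | cons c cs ih =>
    have hc : ¬ c = '#' := fun e => h (e ▸ List.mem_cons_self)
    simp only [runsAux, if_neg hc]
    simp [ih (fun m => h (List.mem_cons_of_mem _ m))]

theorem runsAux_ne_nil_aux (v : List Char) : ∀ (L : Int), '#' ∉ v → L ≠ 0 → runsAux L v ≠ [] := by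
  induction v with
  | nil => intro L _ hL; simp [runsAux, hL]
  | cons d ds ih =>
    intro L hv hL
    have hd : ¬ d = '#' := fun e => hv (e ▸ List.mem_cons_self)
    have : '#' ∉ ds := fun m => hv (List.mem_cons_of_mem _ m)
    simp only [runsAux, if_neg hd, if_pos hL]
    simp

theorem runsAux_ne_nil (u : List Char) : '#' ∈ u → ∀ (l : Int), 0 ≤ l → runsAux l u ≠ [] := by
  induction u with
  | nil => intro hu; simp at hu
  | cons c rest ih =>
    intro hu l hl
    by_cases hc : c = '#'
    · subst hc
      simp only [runsAux, if_pos rfl]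
      by_cases hr : '#' ∈ rest
      · exact ih hr _ (by omega)
      · exact runsAux_ne_nil_aux rest (l + 1) hr (by omega)
    · have hr : '#' ∈ rest := by
        rcases List.mem_cons.mp hu with h | h
        · exact absurd h (fun e => hc e.symm)
        · exact h
      simp only [runsAux, if_neg hc]
      split
      · intro hh
        exact ih hr 0 le_rfl (by simpa using hh)
      · exact ih hr 0 le_rfl

theorem runsAux_drop_prefix (f : Nat) : ∀ (u : List Char), (∀ j < f, u[j]? ≠ some '#') →
    runsAux 0 u = runsAux 0 (u.drop f) := by
  induction f with
  | zero => simp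
  | succ f ih =>
    intro u h
    cases u with
    | nil => simp
    | cons c cs =>
      have hc : ¬ c = '#' := fun e => h 0 (by omega) (by simp [e])
      simp only [runsAux, if_neg hc, if_neg (by simp : ¬ (0:Int) ≠ 0), List.drop_succ_cons]
      exact ih cs (fun j hj => by
        have := h (j + 1) (by omega)
        simpa using this)

theorem runsAux_replicate (m : Nat) (tail : List Char) : ∀ l : Int,
    runsAux l (List.replicate m '#' ++ tail) = runsAux (l + m) tail := by
  induction m with
  | zero => intro l; simp
  | succ m ih =>
    intro l
    simp only [List.replicate_succ, List.cons_append, runsAux, ih]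
    have h : l + 1 + (m : Int) = l + ((m : Nat) + 1 : Nat) := by push_cast; ring
    rw [h]
    simp

theorem runsAux_not_hash_head (tail : List Char) (L : Int) (hL : L ≠ 0)
    (h : tail.head? ≠ some '#') : runsAux L tail = L :: runsAux 0 tail := by
  cases tail with
  | nil => simp [runsAux, hL]
  | cons c cs =>
    have hc : ¬ c = '#' := fun e => h (by simp [e])
    simp [runsAux, hc, hL]

theorem singleton_prefix_head? {α : Type} (x : α) (w : List α) : [x] <+: w ↔ w.head? = some x := by
  cases w with
  | nil => simp
  | cons a l => simp [List.cons_prefix_cons, eq_comm]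

theorem find_decomp (u : List Char) (f : Nat) (hf : PySem.Chars.find u ['#'] = (f : Int)) :
    (u.drop f).head? = some '#' ∧ ∀ j < f, u[j]? ≠ some '#' := by
  have hnn : 0 ≤ PySem.Chars.find u ['#'] := by rw [hf]; positivity
  obtain ⟨hpre, hmin⟩ := PySem.Chars.find_spec (s := u) (sub := ['#']) hnn
  rw [hf, Int.toNat_natCast] at hpre hmin
  refine ⟨(singleton_prefix_head? _ _).1 hpre, ?_⟩
  intro j hj hc
  apply hmin j hj
  rw [singleton_prefix_head? '#' (u.drop j), List.head?_drop]
  exact hc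
-- the B loop, at a valid cursor, decides "remaining runs = remaining stats"
theorem loopB_correct (cs : List Char) (stats : List Int) : ∀ (i : Nat), i ≤ cs.length →
    loopB cs (cs.length : Int) (i : Int) stats = decide (runsAux 0 (cs.drop i) = stats) := by
  induction stats with
  | nil =>
    intro i hi
    simp only [loopB]
    rw [PySem.Chars.findFrom_natCast cs ['#'] i hi]
    by_cases hf : PySem.Chars.find (List.drop i cs) ['#'] = -1
    · have hnh : '#' ∉ List.drop i cs := by
        have := (PySem.Chars.find_eq_neg_one_iff (List.drop i cs) ['#']).1 hf
        exact fun hm => this ((List.singleton_infix_iff '#' _).2 hm)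
      rw [if_pos hf]
      simp [runsAux_no_hash _ hnh]
    · have hpos : 0 ≤ PySem.Chars.find (List.drop i cs) ['#'] := by
        have := PySem.Chars.neg_one_le_find (List.drop i cs) ['#']
        omega
      have hm : '#' ∈ List.drop i cs := by
        have hin : ['#'] <:+: List.drop i cs := by
          by_contra hni
          exact hf ((PySem.Chars.find_eq_neg_one_iff _ _).2 hni)
        exact (List.singleton_infix_iff '#' _).1 hin
      rw [if_neg hf]
      have hlt : ¬ ((i : Int) + PySem.Chars.find (List.drop i cs) ['#'] < 0) := by omega
      simp [hlt, runsAux_ne_nil _ hm 0 le_rfl]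
  | cons k ks ih =>
    intro i hi
    simp only [loopB]
    rw [PySem.Chars.findFrom_natCast cs ['#'] i hi]
    by_cases hf : PySem.Chars.find (List.drop i cs) ['#'] = -1
    · have hnh : '#' ∉ List.drop i cs := by
        have := (PySem.Chars.find_eq_neg_one_iff (List.drop i cs) ['#']).1 hf
        exact fun hm => this ((List.singleton_infix_iff '#' _).2 hm)
      rw [if_pos (by rw [if_pos hf]; omega)]
      simp [runsAux_no_hash _ hnh]
    · have hpos : 0 ≤ PySem.Chars.find (List.drop i cs) ['#'] := by
        have := PySem.Chars.neg_one_le_find (List.drop i cs) ['#']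
        omega
      obtain ⟨f, hfv⟩ : ∃ f : Nat, PySem.Chars.find (List.drop i cs) ['#'] = (f : Int) :=
        ⟨(PySem.Chars.find (List.drop i cs) ['#']).toNat, by omega⟩
      obtain ⟨hdropf, hmin⟩ := find_decomp (List.drop i cs) f hfv
      rw [if_neg hf, hfv]
      rw [if_neg (by omega : ¬ ((i : Int) + (f : Int) < 0))]
      -- decompose the suffix at the first '#'
      set u := List.drop i cs with hu
      set v := u.drop f with hv
      set m := (v.takeWhile (fun c => c == '#')).length with hm
      set tail := v.dropWhile (fun c => c == '#') with htail
      have hrepl : v.takeWhile (fun c => c == '#') = List.replicate m '#' := by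
        rw [hm]
        exact List.eq_replicate_of_mem (fun c hc => by simpa using List.mem_takeWhile_imp hc)
      have hvdecomp : v = List.replicate m '#' ++ tail := by
        rw [← hrepl, htail, List.takeWhile_append_dropWhile]
      have hm1 : 1 ≤ m := by
        cases hvv : v with
        | nil => rw [hvv] at hdropf; simp at hdropf
        | cons c cs' =>
          rw [hvv] at hdropf
          simp only [List.head?_cons, Option.some.injEq] at hdropf
          rw [hm, hvv, List.takeWhile_cons, if_pos (by simp [hdropf])]
          simp
      have htailhd : tail.head? ≠ some '#' := by
        intro hh
        have := List.head?_dropWhile_not (p := fun c => c == '#') (l := v)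
        rw [← htail, hh] at this
        simp at this
      have hruns : runsAux 0 u = (m : Int) :: runsAux 0 tail := by
        rw [runsAux_drop_prefix f u hmin, ← hv, hvdecomp, runsAux_replicate]
        have h0 : (0 : Int) + (m : Int) = (m : Int) := by ring
        rw [h0]
        exact runsAux_not_hash_head tail (m : Int) (by omega) htailhd
      -- lengths
      have hiu : i + u.length = cs.length := by
        have : u.length = cs.length - i := by rw [hu]; simp
        omega
      have hfu : f < u.length := by
        have hne : List.drop f u ≠ [] := by
          intro he
          rw [hv] at hdropf
          rw [he] at hdropf
          simp at hdropf
        have hle : ¬ u.length ≤ f := fun hle => hne (List.drop_eq_nil_iff.mpr hle)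
        omega
      have hvu : v.length + f = u.length := by
        rw [hv, List.length_drop]
        omega
      have hvm : v.length = m + tail.length := by rw [hvdecomp]; simp
      have hvc : List.drop (i + f) cs = v := by
        rw [hv, hu, List.drop_drop, Nat.add_comm]
      by_cases hk : k ≤ 0
      · rw [if_pos (Or.inl hk)]
        rw [hruns]
        have hne : ¬ (((m : Int) :: runsAux 0 tail) = k :: ks) := by
          intro he
          injection he with h1 _
          omega
        simp [hne]
      · push_neg at hk
        obtain ⟨kn, hkn⟩ : ∃ kn : Nat, k = (kn : Int) := ⟨k.toNat, by omega⟩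
        subst hkn
        have hkn1 : 1 ≤ kn := by omega
        have hseg : PySem.List.slice cs (some ((i : Int) + (f : Int))) (some ((i : Int) + (f : Int) + (kn : Int))) = v.take kn := by
          have h1 : ((i : Int) + (f : Int)) = ((i + f : Nat) : Int) := by push_cast; ring
          rw [h1, PySem.List.slice_natCast_add, hvc]
        rw [hseg]
        rcases lt_trichotomy kn m with hlt | heq | hgt
        · -- kn < m : the run continues past the k checked characters
          have hsegr : v.take kn = List.replicate kn '#' := by
            rw [hvdecomp, List.take_append_of_le_length (by simp; omega), List.take_replicate,
              Nat.min_eq_left (by omega)]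
          rw [if_neg (by
            rintro (h | h | h)
            · omega
            · rw [hsegr] at h; simp at h
            · rw [hsegr] at h
              simp only [List.any_eq_true] at h
              obtain ⟨c, hc, hne⟩ := h
              exact absurd (List.eq_of_mem_replicate hc) (by simpa using hne))]
          have hdv : List.drop (i + f + kn) cs = List.replicate (m - kn) '#' ++ tail := by
            rw [← List.drop_drop, hvc, hvdecomp,
              List.drop_append_of_le_length (by simp; omega), List.drop_replicate]
          have hgetc : cs[i + f + kn]? = some '#' := by
            rw [← List.head?_drop, hdv, List.head?_append, List.head?_replicate,
              if_neg (by omega : ¬ (m - kn = 0))]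
            rfl
          rw [if_pos ?side]
          case side =>
            constructor
            · have : i + f + kn < cs.length := by omega
              push_cast
              omega
            · have h3 : ((i : Int) + (f : Int) + (kn : Int)) = ((i + f + kn : Nat) : Int) := by push_cast; ring
              rw [h3, PySem.List.pyGetD_natCast, List.getD, hgetc]
              rfl
          rw [hruns]
          have hne : ¬ (((m : Int) :: runsAux 0 tail) = (kn : Int) :: ks) := by
            intro he
            injection he with h1 _
            omega
          simp [hne]
        · -- kn = m : this run matches; continue with the rest
          rw [heq]
          have hsegr : v.take m = List.replicate m '#' := by
            rw [hvdecomp, List.take_append_of_le_length (by simp), List.take_replicate,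
              Nat.min_eq_left (by omega)]
          rw [if_neg (by
            rintro (h | h | h)
            · omega
            · rw [hsegr] at h; simp at h
            · rw [hsegr] at h
              simp only [List.any_eq_true] at h
              obtain ⟨c, hc, hne⟩ := h
              exact absurd (List.eq_of_mem_replicate hc) (by simpa using hne))]
          have hdt : List.drop (i + f + m) cs = tail := by
            rw [← List.drop_drop, hvc, hvdecomp,
              List.drop_append_of_le_length (by simp), List.drop_replicate]
            simp
          rw [if_neg ?noext]
          case noext =>
            rintro ⟨hlt2, hg⟩
            have hlt' : i + f + m < cs.length := by push_cast at hlt2; omega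
            have h3 : ((i : Int) + (f : Int) + (m : Int)) = ((i + f + m : Nat) : Int) := by push_cast; ring
            rw [h3, PySem.List.pyGetD_natCast, List.getD] at hg
            have htl : tail ≠ [] := by
              intro he
              rw [he, List.length_nil] at hvm
              omega
            obtain ⟨c, cs', hcs⟩ := List.exists_cons_of_ne_nil htl
            have : cs[i + f + m]? = some c := by
              rw [← List.head?_drop, hdt, hcs]
              rfl
            rw [this] at hg
            simp at hg
            apply htailhd
            rw [hcs, hg]
            rfl
          have h3 : ((i : Int) + (f : Int) + (m : Int)) = ((i + f + m : Nat) : Int) := by push_cast; ring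
          rw [h3, ih (i + f + m) (by omega), hdt, hruns]
          by_cases hrt : runsAux 0 tail = ks
          · simp [hrt]
          · simp [hrt]
        · -- m < kn : the checked window runs past the '#'-run
          rw [hruns]
          have hne : ¬ (((m : Int) :: runsAux 0 tail) = (kn : Int) :: ks) := by
            intro he
            injection he with h1 _
            omega
          by_cases hlen : kn ≤ v.length
          · have htl : tail ≠ [] := by
              intro he
              rw [he, List.length_nil] at hvm
              omega
            obtain ⟨c, cs', hcs⟩ := List.exists_cons_of_ne_nil htl
            have hc : c ≠ '#' := by
              intro he
              exact htailhd (by rw [hcs, he]; rfl)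
            have hmem : c ∈ v.take kn := by
              rw [hvdecomp, List.take_append, List.take_replicate,
                Nat.min_eq_right (by omega), List.length_replicate, hcs]
              obtain ⟨t, ht⟩ : ∃ t, kn - m = t + 1 := ⟨kn - m - 1, by omega⟩
              rw [ht, List.take_succ_cons]
              exact List.mem_append_right _ List.mem_cons_self
            rw [if_pos (Or.inr (Or.inr (by
              simp only [List.any_eq_true]
              exact ⟨c, hmem, by simpa using hc⟩)))]
            simp [hne]
          · rw [if_pos (Or.inr (Or.inl (by
              rw [List.length_take]
              push_cast
              omega)))]
            simp [hne]

-- ===== VERDICT (by name: the statement is the Claim_ definition above) =====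
theorem satisfies_spec : Claim_equal_satisfies := by
  intro record stats _
  unfold Spec_satisfies satisfies satisfies_alt
  simp only [PySem.Str.len_eq]
  rw [PySem.List.foldl_pyRange_zero_pyGetD' record.toList ' ' stepA ([], 0)]
  have hA := foldA_eq_runsAux record.toList [] 0
  have hB := loopB_correct record.toList stats 0 (by omega)
  simp only [Nat.cast_zero] at hB
  simp only [hA, List.nil_append]
  rw [hB]
  simp
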